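-- pv_equiv track=rewrite | github.com/pypi-data/pypi-mirror-59 | packages/openlego/openlego-1.5.0.tar.gz/openlego-1.5.0/openlego/docs/_utils/docutil.py | clean_up_empty_output_blocks
-- ===== SOURCE A (Python) =====
-- def clean_up_empty_output_blocks(input_blocks, output_blocks):
--     """Some of the blocks do not generate output. We only want to have
--     input blocks that have outputs.
--     """
--
--     new_input_blocks = []
--     new_output_blocks = []
--     current_in_block = ''
--     for in_block, out_block in zip(input_blocks, output_blocks):
--         if current_in_block and not current_in_block.endswith('\n'):
--             current_in_block += '\n'
--         current_in_block += in_block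
--         if out_block:
--             new_input_blocks.append(current_in_block)
--             new_output_blocks.append(out_block)
--             current_in_block = ''
--
--     # if there was no output, return the one input block and empty output block
--     if current_in_block:
--         new_input_blocks.append(current_in_block)
--         new_output_blocks.append('')
--
--     return new_input_blocks, new_output_blocks
-- ===== SOURCE B (Python) =====
-- def clean_up_empty_output_blocks(input_blocks, output_blocks):
--     """Two-pass version: partition the zipped blocks into groups that each end
--     at a truthy output block, then join each group's inputs."""
--     groups = []
--     pending = []
--     for in_block, out_block in zip(input_blocks, output_blocks):
--         pending.append(in_block)
--         if out_block:
--             groups.append((pending, out_block))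
--             pending = []
--     if any(pending):
--         groups.append((pending, ''))
--     return [_join(blocks) for blocks, _ in groups], [out for _, out in groups]
--
--
-- def _join(blocks):
--     acc = ''
--     for b in blocks:
--         if acc and not acc.endswith('\n'):
--             acc += '\n'
--         acc += b
--     return acc
-- ===== Notes on version B (the rewrite author's own statement) =====
-- stated objective: alternative
-- what changed: Replaces A's single interleaved accumulator loop by a partition pass that groups consecutive inputs up to each truthy output, followed by a join pass that folds each group into one string.
import Mathlib
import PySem

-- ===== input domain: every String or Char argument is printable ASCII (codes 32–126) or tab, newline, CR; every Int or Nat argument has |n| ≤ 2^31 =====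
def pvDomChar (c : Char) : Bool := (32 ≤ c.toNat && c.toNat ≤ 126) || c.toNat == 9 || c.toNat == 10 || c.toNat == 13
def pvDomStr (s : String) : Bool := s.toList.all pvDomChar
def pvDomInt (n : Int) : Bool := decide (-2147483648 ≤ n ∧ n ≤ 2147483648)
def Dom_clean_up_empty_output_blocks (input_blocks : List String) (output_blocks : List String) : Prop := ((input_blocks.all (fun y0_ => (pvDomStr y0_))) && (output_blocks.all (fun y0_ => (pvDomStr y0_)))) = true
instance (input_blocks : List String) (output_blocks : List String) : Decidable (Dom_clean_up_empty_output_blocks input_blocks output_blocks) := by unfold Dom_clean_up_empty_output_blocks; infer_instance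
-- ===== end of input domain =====

-- B replaces A's interleaved accumulator loop by a partition pass plus a join pass (alternative decomposition, same cost).

-- shared step: Python's « if acc and not acc.endswith('\n'): acc += '\n' ; acc += b » (both sources contain this text)
def pvLineCat (acc b : String) : String :=
  (if acc ≠ "" ∧ PySem.Str.endswith acc "\n" = false then acc ++ "\n" else acc) ++ b

-- ===== PORT A =====
def clean_up_empty_output_blocks (input_blocks : List String) (output_blocks : List String) : List String × List String :=
  let r := (input_blocks.zip output_blocks).foldl
    (fun (st : List String × List String × String) p =>
      let cur := pvLineCat st.2.2 p.1
      if p.2 ≠ "" then (st.1 ++ [cur], st.2.1 ++ [p.2], "") else (st.1, st.2.1, cur))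
    ([], [], "")
  if r.2.2 ≠ "" then (r.1 ++ [r.2.2], r.2.1 ++ [""]) else (r.1, r.2.1)

-- ===== PORT B =====
-- B's helper _join
def pvJoin (blocks : List String) : String := blocks.foldl pvLineCat ""

def clean_up_empty_output_blocks_alt (input_blocks : List String) (output_blocks : List String) : List String × List String :=
  let r := (input_blocks.zip output_blocks).foldl
    (fun (st : List (List String × String) × List String) p =>
      let pending := st.2 ++ [p.1]
      if p.2 ≠ "" then (st.1 ++ [(pending, p.2)], []) else (st.1, pending))
    ([], [])
  let groups := if r.2.any (fun b => b ≠ "") then r.1 ++ [(r.2, "")] else r.1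
  (groups.map (fun g => pvJoin g.1), groups.map (fun g => g.2))

-- ===== PRECONDITION & SPEC =====
def Spec_clean_up_empty_output_blocks (input_blocks : List String) (output_blocks : List String) (out : List String × List String) : Prop := out = clean_up_empty_output_blocks_alt input_blocks output_blocks
instance (input_blocks : List String) (output_blocks : List String) (out : List String × List String) : Decidable (Spec_clean_up_empty_output_blocks input_blocks output_blocks out) := by unfold Spec_clean_up_empty_output_blocks; infer_instance

-- ===== CLAIM (what is proved, stated in full; the proofs are below) =====
def Claim_equal_clean_up_empty_output_blocks : Prop := ∀ (input_blocks : List String) (output_blocks : List String), Dom_clean_up_empty_output_blocks input_blocks output_blocks → Spec_clean_up_empty_output_blocks input_blocks output_blocks (clean_up_empty_output_blocks input_blocks output_blocks)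

-- ===== LEMMAS AND PROOFS =====

theorem string_append_eq_empty {s t : String} : s ++ t = "" ↔ s = "" ∧ t = "" := by
  constructor
  · intro h
    have : (s ++ t).toList = ("" : String).toList := by rw [h]
    simp at this
    exact ⟨String.toList_inj.mp (by simp [this.1]), String.toList_inj.mp (by simp [this.2])⟩
  · rintro ⟨rfl, rfl⟩; rfl

theorem pvLineCat_eq_empty (acc b : String) : pvLineCat acc b = "" ↔ acc = "" ∧ b = "" := by
  unfold pvLineCat
  split_ifs with h
  · rw [string_append_eq_empty, string_append_eq_empty]
    constructor
    · rintro ⟨⟨h1, _⟩, _⟩; exact absurd h1 h.1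
    · rintro ⟨rfl, _⟩; exact absurd rfl h.1
  · exact string_append_eq_empty

theorem pvJoin_append (blocks : List String) (b : String) :
    pvJoin (blocks ++ [b]) = pvLineCat (pvJoin blocks) b := by
  simp [pvJoin]

theorem pvJoin_ne_empty (blocks : List String) :
    (pvJoin blocks ≠ "") ↔ blocks.any (fun b => b ≠ "") = true := by
  induction blocks using List.reverseRecOn with
  | nil => simp [pvJoin]
  | append_singleton xs x ih =>
    rw [pvJoin_append]
    constructor
    · intro h
      rcases not_and_or.mp ((pvLineCat_eq_empty _ _).not.mp h) with h' | h'
      · simp only [List.any_append, Bool.or_eq_true]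
        exact Or.inl (ih.mp h')
      · simp only [List.any_append, Bool.or_eq_true]
        exact Or.inr (by simp [h'])
    · intro h
      rw [Ne, pvLineCat_eq_empty, not_and_or]
      simp only [List.any_append, List.any_cons, List.any_nil, Bool.or_eq_true] at h
      rcases h with h | h
      · exact Or.inl (ih.mpr h)
      · right; simpa using h

theorem loop_eq (L : List (String × String)) (gs : List (List String × String)) (pd : List String) :
    L.foldl
      (fun (st : List String × List String × String) p =>
        let cur := pvLineCat st.2.2 p.1
        if p.2 ≠ "" then (st.1 ++ [cur], st.2.1 ++ [p.2], "") else (st.1, st.2.1, cur))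
      (gs.map (fun g => pvJoin g.1), gs.map (fun g => g.2), pvJoin pd)
    = (let r := L.foldl
        (fun (st : List (List String × String) × List String) p =>
          let pending := st.2 ++ [p.1]
          if p.2 ≠ "" then (st.1 ++ [(pending, p.2)], []) else (st.1, pending))
        (gs, pd)
       (r.1.map (fun g => pvJoin g.1), r.1.map (fun g => g.2), pvJoin r.2)) := by
  induction L generalizing gs pd with
  | nil => rfl
  | cons p L ih =>
    simp only [List.foldl_cons]
    by_cases h : p.2 = ""
    · rw [if_neg (fun hc => hc h), if_neg (fun hc => hc h), ← pvJoin_append]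
      exact ih gs (pd ++ [p.1])
    · rw [if_pos h, if_pos h]
      have := ih (gs ++ [(pd ++ [p.1], p.2)]) []
      simpa [pvJoin] using this

-- ===== VERDICT (by name: the statement is the Claim_ definition above) =====
theorem clean_up_empty_output_blocks_spec : Claim_equal_clean_up_empty_output_blocks := by
  intro input_blocks output_blocks _
  unfold Spec_clean_up_empty_output_blocks clean_up_empty_output_blocks clean_up_empty_output_blocks_alt
  have h := loop_eq (input_blocks.zip output_blocks) [] []
  simp only [List.map_nil] at h
  rw [show pvJoin [] = "" from rfl] at h
  rw [h]
  set r := (input_blocks.zip output_blocks).foldl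
    (fun (st : List (List String × String) × List String) p =>
      let pending := st.2 ++ [p.1]
      if p.2 ≠ "" then (st.1 ++ [(pending, p.2)], []) else (st.1, pending))
    ([], []) with hr
  by_cases hp : r.2.any (fun b => b ≠ "") = true
  · have h1 : ¬ (pvJoin r.2 = "") := (pvJoin_ne_empty r.2).mpr hp
    have h2 : ∃ x ∈ r.2, ¬x = "" := by simpa using hp
    simp only [pvJoin] at h1
    simp [h1, h2, pvJoin]
  · have h1 : pvJoin r.2 = "" := by
      by_contra hc; exact hp ((pvJoin_ne_empty r.2).mp hc)
    have h2 : ¬ ∃ x ∈ r.2, ¬x = "" := by simpa using hp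
    simp only [pvJoin] at h1
    simp [h1, h2, pvJoin]
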